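-- pv_equiv track=rewrite | github.com/Bizuayeu/Plugins-Weave | VisualExpression/skills/scripts/MakeExpressionJson/domain/constants.py | build_expression_codes
-- ===== SOURCE A (Python) =====
-- SPECIAL_CODES_COUNT = 4
--
-- DEFAULT_SPECIAL_CODES = ["sleepy", "cynical", "defeated", "dreamy"]
--
-- def build_expression_codes(special_codes: list[str] | None = None) -> list[str]:
--     """
--     Build expression codes list with optional custom Special codes.
--
--     Args:
--         special_codes: Custom Special codes (4 items). None = use defaults.
--
--     Returns:
--         List of 20 expression codes
--     """
--     if special_codes is None:
--         special_codes = DEFAULT_SPECIAL_CODES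
--
--     if len(special_codes) != SPECIAL_CODES_COUNT:
--         raise ValueError(
--             f"Special codes must have exactly {SPECIAL_CODES_COUNT} items, "
--             f"got {len(special_codes)}"
--         )
--
--     # Base codes (16) + Special (4) = 20
--     # Grid order: left-to-right, top-to-bottom with Col = Category
--     base_codes = [
--         # Row1: Basic → Emotion → Negative → Anxiety
--         "normal", "joy", "anger", "anxiety",
--         # Row2
--         "smile", "elation", "sadness", "fear",
--         # Row3
--         "focus", "surprise", "rage", "upset",
--         # Row4
--         "diverge", "calm", "disgust", "worry",
--     ]
--     # Insert Special codes at positions 4, 9, 14, 19 (Col5 for each row)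
--     result = []
--     for i, code in enumerate(base_codes):
--         result.append(code)
--         if (i + 1) % 4 == 0:  # After each row's 4 base codes
--             result.append(special_codes[(i + 1) // 4 - 1])
--     return result
-- ===== SOURCE B (Python) =====
-- SPECIAL_CODES_COUNT = 4
--
-- DEFAULT_SPECIAL_CODES = ["sleepy", "cynical", "defeated", "dreamy"]
--
-- def build_expression_codes(special_codes=None):
--     if special_codes is None:
--         special_codes = DEFAULT_SPECIAL_CODES
--
--     if len(special_codes) != SPECIAL_CODES_COUNT:
--         raise ValueError(
--             f"Special codes must have exactly {SPECIAL_CODES_COUNT} items, "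
--             f"got {len(special_codes)}"
--         )
--
--     rows = [
--         ["normal", "joy", "anger", "anxiety"],
--         ["smile", "elation", "sadness", "fear"],
--         ["focus", "surprise", "rage", "upset"],
--         ["diverge", "calm", "disgust", "worry"],
--     ]
--     result = []
--     for row, sp in zip(rows, special_codes):
--         result.extend(row)
--         result.append(sp)
--     return result
-- ===== Notes on version B (the rewrite author's own statement) =====
-- stated objective: simpler
-- what changed: Replaces the flat 16-step loop with a modulo counter and computed special-code index by a 4-step loop over explicit rows zipped with the special codes.
import Mathlib
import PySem

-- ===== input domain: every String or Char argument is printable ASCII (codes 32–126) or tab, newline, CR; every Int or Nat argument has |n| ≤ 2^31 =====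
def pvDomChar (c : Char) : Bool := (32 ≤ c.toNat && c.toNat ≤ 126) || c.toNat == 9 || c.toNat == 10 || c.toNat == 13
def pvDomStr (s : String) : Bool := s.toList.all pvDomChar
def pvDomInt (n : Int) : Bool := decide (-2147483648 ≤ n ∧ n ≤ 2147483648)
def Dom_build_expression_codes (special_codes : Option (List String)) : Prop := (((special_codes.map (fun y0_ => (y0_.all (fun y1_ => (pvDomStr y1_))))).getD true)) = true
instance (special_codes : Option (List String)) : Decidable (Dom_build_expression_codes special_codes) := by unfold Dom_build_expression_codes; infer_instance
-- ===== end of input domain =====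

-- B (simpler): builds the 20-code list by a 4-step loop over explicit rows zipped with the special codes,
-- instead of A's 16-step flat loop with a modulo counter and a computed special-code index; guards unchanged.


-- ===== PORT A =====
def build_expression_codes (special_codes : Option (List String)) : List String :=
  let sc := special_codes.getD ["sleepy", "cynical", "defeated", "dreamy"]
  -- Python raises ValueError when len(sc) != 4; Pre_ excludes exactly those inputs
  let base_codes : List String :=
    ["normal", "joy", "anger", "anxiety",
     "smile", "elation", "sadness", "fear",
     "focus", "surprise", "rage", "upset",
     "diverge", "calm", "disgust", "worry"]
  (PySem.List.enumerate base_codes).foldl (fun result (p : Int × String) =>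
    let result := result ++ [p.2]
    if (p.1 + 1) % 4 == 0 then
      result ++ [(PySem.List.pyGet? sc (PySem.Int.floordiv (p.1 + 1) 4 - 1)).getD ""]  -- index always in range under Pre_
    else result) []

-- ===== PORT B =====
def build_expression_codes_alt (special_codes : Option (List String)) : List String :=
  let sc := special_codes.getD ["sleepy", "cynical", "defeated", "dreamy"]
  let rows : List (List String) :=
    [["normal", "joy", "anger", "anxiety"],
     ["smile", "elation", "sadness", "fear"],
     ["focus", "surprise", "rage", "upset"],
     ["diverge", "calm", "disgust", "worry"]]
  (List.zip rows sc).foldl (fun result rs => result ++ rs.1 ++ [rs.2]) []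

-- ===== PRECONDITION & SPEC =====
-- Pre_: Python A raises ValueError unless the (defaulted) list has exactly 4 items
def Pre_build_expression_codes (special_codes : Option (List String)) : Prop :=
  (special_codes.map List.length).getD 4 = 4
instance (special_codes : Option (List String)) : Decidable (Pre_build_expression_codes special_codes) := by unfold Pre_build_expression_codes; infer_instance
def pvWitness_build_expression_codes : Option (List String) := some ["a", "b", "c", "d"]
def Spec_build_expression_codes (special_codes : Option (List String)) (out : List String) : Prop := out = build_expression_codes_alt special_codes
instance (special_codes : Option (List String)) (out : List String) : Decidable (Spec_build_expression_codes special_codes out) := by unfold Spec_build_expression_codes; infer_instance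

-- ===== CLAIM (what is proved, stated in full; the proofs are below) =====
def Claim_equal_build_expression_codes : Prop := ∀ (special_codes : Option (List String)), Dom_build_expression_codes special_codes → Pre_build_expression_codes special_codes → Spec_build_expression_codes special_codes (build_expression_codes special_codes)

-- ===== LEMMAS AND PROOFS =====

-- ===== VERDICT (by name: the statement is the Claim_ definition above) =====
theorem build_expression_codes_spec : Claim_equal_build_expression_codes := by
  intro sc _ hpre
  unfold Spec_build_expression_codes
  cases sc with
  | none => rfl
  | some l =>
    unfold Pre_build_expression_codes at hpre
    simp only [Option.map_some, Option.getD_some] at hpre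
    rcases l with _ | ⟨a, _ | ⟨b, _ | ⟨c, _ | ⟨d, _ | ⟨e, t⟩⟩⟩⟩⟩ <;> simp at hpre
    simp [build_expression_codes, build_expression_codes_alt, PySem.List.enumerate,
      PySem.List.pyGet?, PySem.List.pyIdx?, PySem.Int.floordiv, List.foldl, List.zip]
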